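-- pv_equiv track=rewrite | github.com/paulklemstine/factor | lean/demo/HigherDimensionalQuadrupleDivisionFactoring/NormFactoring/norm_factoring_demo.py | factor_via_collision_dim4
-- ===== SOURCE A (Python) =====
-- import math
-- from itertools import combinations
-- from typing import List, Tuple, Optional
--
-- def sum_of_4_squares(n: int) -> List[Tuple[int, int, int, int]]:
--     """Find representations of n as a² + b² + c² + d² with a ≤ b ≤ c ≤ d."""
--     reps = []
--     for a in range(int(math.isqrt(n)) + 1):
--         if a * a > n:
--             break
--         for b in range(a, int(math.isqrt(n - a * a)) + 1):
--             if a * a + b * b > n: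
--                 break
--             for c in range(b, int(math.isqrt(n - a * a - b * b)) + 1):
--                 d_sq = n - a * a - b * b - c * c
--                 if d_sq < c * c:
--                     continue
--                 d = int(math.isqrt(d_sq))
--                 if d * d == d_sq:
--                     reps.append((a, b, c, d))
--     return reps
--
-- def factor_via_collision_dim4(n: int, max_reps: int = 20) -> Optional[int]:
--     """
--     Factor n using collisions between sum-of-4-squares representations.
--     More channels per collision → higher success rate.
--     """
--     reps = sum_of_4_squares(n)[:max_reps]
--     if len(reps) < 2:
--         return None
--
--     for r1, r2 in combinations(reps, 2):
--         # Try all pairs of components as cross-products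
--         for i in range(4):
--             for j in range(4):
--                 if i == j:
--                     continue
--                 cross = r1[i] * r2[j] - r1[j] * r2[i]
--                 if cross == 0:
--                     continue
--                 g = math.gcd(abs(cross), n)
--                 if 1 < g < n:
--                     return g
--     return None
-- ===== SOURCE B (Python) =====
-- import math
--
--
-- def _reps(k, m, lo):
--     """All nondecreasing k-vectors (as lists) of ints >= lo whose squares sum to m."""
--     if k == 1:
--         d = math.isqrt(m)
--         return [[d]] if d * d == m and d >= lo else []
--     out = []
--     for x in range(lo, math.isqrt(m) + 1):
--         for rest in _reps(k - 1, m - x * x, x):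
--             out.append([x] + rest)
--     return out
--
--
-- def factor_via_collision_dim4(n, max_reps=20):
--     reps = _reps(4, n, 0)[:max_reps]
--     if len(reps) < 2:
--         return None
--     rest = reps
--     for r1 in reps:
--         rest = rest[1:]
--         for r2 in rest:
--             # cross(i,j) = -cross(j,i), so scanning i<j finds the same first hit
--             for i in range(4):
--                 for j in range(i + 1, 4):
--                     cross = r1[i] * r2[j] - r1[j] * r2[i]
--                     if cross == 0:
--                         continue
--                     g = math.gcd(abs(cross), n)
--                     if 1 < g < n:
--                         return g
--     return None
-- ===== Notes on version B (the rewrite author's own statement) =====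
-- stated objective: alternative
-- what changed: sum_of_4_squares's three hand-coded nested loops with per-level break/continue guards are replaced by a single generic recursive enumerator _reps(k, m, lo) of nondecreasing k-vectors of squares summing to m, and the collision scan visits only index pairs i<j (cross-products are antisymmetric, so the skipped j<i probes can never produce a hit first), scanning the remaining reps via a shrinking rest list instead of itertools.combinations.
import Mathlib
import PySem

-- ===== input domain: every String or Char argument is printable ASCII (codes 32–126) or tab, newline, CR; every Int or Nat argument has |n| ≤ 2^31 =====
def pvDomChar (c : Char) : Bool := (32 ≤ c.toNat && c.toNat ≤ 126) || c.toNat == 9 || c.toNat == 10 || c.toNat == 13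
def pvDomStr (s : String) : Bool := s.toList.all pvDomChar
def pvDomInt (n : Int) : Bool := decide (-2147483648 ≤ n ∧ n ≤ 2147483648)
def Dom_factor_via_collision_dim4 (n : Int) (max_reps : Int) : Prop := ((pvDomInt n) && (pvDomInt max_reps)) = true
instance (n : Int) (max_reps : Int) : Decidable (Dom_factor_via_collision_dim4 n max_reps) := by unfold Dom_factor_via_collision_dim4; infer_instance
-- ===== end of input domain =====

-- B replaces A's hard-coded triple-nested sum-of-4-squares loops by a generic recursive
-- k-squares enumerator and scans only index pairs i<j in the collision phase (cross is
-- antisymmetric); objective: alternative decomposition, same results proved equal.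


-- ===== PORT A =====

-- math.isqrt(m); exact for 0 ≤ m (math.isqrt raises ValueError on negative input,
-- which under Pre_ happens only for n < 0, excluded)
def pyIsqrt (m : Int) : Int := (Nat.sqrt m.toNat : Int)

-- math.gcd(a, b) = gcd of absolute values; exact on all ints
def pyGcd (a b : Int) : Int := (Int.gcd a b : Int)

-- innermost `for c in range(...)` loop of sum_of_4_squares (acc-passing, `continue` kept)
def aLoopC (n a b : Int) : List Int → List (Int × Int × Int × Int) → List (Int × Int × Int × Int)
  | [], acc => acc
  | c :: cs, acc =>
    let d_sq := n - a * a - b * b - c * c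
    if d_sq < c * c then aLoopC n a b cs acc
    else
      let d := pyIsqrt d_sq
      if d * d = d_sq then aLoopC n a b cs (acc ++ [(a, b, c, d)])
      else aLoopC n a b cs acc

-- `for b in range(a, ...)` loop with its break
def aLoopB (n a : Int) : List Int → List (Int × Int × Int × Int) → List (Int × Int × Int × Int)
  | [], acc => acc
  | b :: bs, acc =>
    if a * a + b * b > n then acc
    else aLoopB n a bs (aLoopC n a b (PySem.List.pyRange b (pyIsqrt (n - a * a - b * b) + 1) 1) acc)

-- `for a in range(...)` loop with its break
def aLoopA (n : Int) : List Int → List (Int × Int × Int × Int) → List (Int × Int × Int × Int)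
  | [], acc => acc
  | a :: as_, acc =>
    if a * a > n then acc
    else aLoopA n as_ (aLoopB n a (PySem.List.pyRange a (pyIsqrt (n - a * a) + 1) 1) acc)

def sum_of_4_squares (n : Int) : List (Int × Int × Int × Int) :=
  aLoopA n (PySem.List.pyRange 0 (pyIsqrt n + 1) 1) []

-- r[i] on a 4-tuple, i ∈ range(4) (i is always 0..3 in A)
def tget (r : Int × Int × Int × Int) (i : Int) : Int :=
  if i = 0 then r.1 else if i = 1 then r.2.1 else if i = 2 then r.2.2.1 else r.2.2.2

-- inner `for j in range(4)` loop (with the i == j continue)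
def aScanJ (n : Int) (r1 r2 : Int × Int × Int × Int) (i : Int) : List Int → Option Int
  | [] => none
  | j :: js =>
    if i = j then aScanJ n r1 r2 i js
    else
      let cross := tget r1 i * tget r2 j - tget r1 j * tget r2 i
      if cross = 0 then aScanJ n r1 r2 i js
      else
        let g := pyGcd |cross| n
        if 1 < g ∧ g < n then some g else aScanJ n r1 r2 i js

-- `for i in range(4)` loop
def aScanI (n : Int) (r1 r2 : Int × Int × Int × Int) : List Int → Option Int
  | [] => none
  | i :: is_ =>
    match aScanJ n r1 r2 i (PySem.List.pyRange 0 4 1) with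
    | some g => some g
    | none => aScanI n r1 r2 is_

-- `for r1, r2 in combinations(reps, 2)` (PySem.List.combinations yields the pairs as 2-lists)
def aScanPairs (n : Int) : List (List (Int × Int × Int × Int)) → Option Int
  | [] => none
  | [r1, r2] :: rest =>
    (match aScanI n r1 r2 (PySem.List.pyRange 0 4 1) with
     | some g => some g
     | none => aScanPairs n rest)
  | _ :: rest => aScanPairs n rest

def factor_via_collision_dim4 (n : Int) (max_reps : Int) : Option Int :=
  let reps := PySem.List.slice (sum_of_4_squares n) none (some max_reps)
  if reps.length < 2 then none
  else aScanPairs n (PySem.List.combinations reps 2)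

-- ===== PORT B =====

-- _reps(k, m, lo): generic recursion; counter ported as a Nat (B only calls k ≥ 1;
-- the 0 case is unreachable)
def bReps : Nat → Int → Int → List (List Int)
  | 0, _, _ => []
  | 1, m, lo =>
    let d := pyIsqrt m
    if d * d = m ∧ lo ≤ d then [[d]] else []
  | (k + 2), m, lo =>
    (PySem.List.pyRange lo (pyIsqrt m + 1) 1).foldl
      (fun out x =>
        (bReps (k + 1) (m - x * x) x).foldl (fun out2 rest => out2 ++ [x :: rest]) out)
      []

-- r[i] on a 4-element list, i ∈ 0..3 (always in range in B)
def lget (r : List Int) (i : Int) : Int := PySem.List.pyGetD r i 0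

-- inner `for j in range(i + 1, 4)` loop
def bScanJ (n : Int) (r1 r2 : List Int) (i : Int) : List Int → Option Int
  | [] => none
  | j :: js =>
    let cross := lget r1 i * lget r2 j - lget r1 j * lget r2 i
    if cross = 0 then bScanJ n r1 r2 i js
    else
      let g := pyGcd |cross| n
      if 1 < g ∧ g < n then some g else bScanJ n r1 r2 i js

-- `for i in range(4)` loop
def bScanI (n : Int) (r1 r2 : List Int) : List Int → Option Int
  | [] => none
  | i :: is_ =>
    match bScanJ n r1 r2 i (PySem.List.pyRange (i + 1) 4 1) with
    | some g => some g
    | none => bScanI n r1 r2 is_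

-- `for r2 in rest` loop
def bScanR2 (n : Int) (r1 : List Int) : List (List Int) → Option Int
  | [] => none
  | r2 :: t =>
    match bScanI n r1 r2 (PySem.List.pyRange 0 4 1) with
    | some g => some g
    | none => bScanR2 n r1 t

-- `for r1 in reps` loop, carrying `rest` (rest = rest[1:] each iteration)
def bScanR1 (n : Int) : List (List Int) → List (List Int) → Option Int
  | [], _ => none
  | r1 :: t, rest =>
    let rest' := PySem.List.slice rest (some 1) none
    match bScanR2 n r1 rest' with
    | some g => some g
    | none => bScanR1 n t rest'

def factor_via_collision_dim4_alt (n : Int) (max_reps : Int) : Option Int :=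
  let reps := PySem.List.slice (bReps 4 n 0) none (some max_reps)
  if reps.length < 2 then none
  else bScanR1 n reps reps

-- ===== PRECONDITION & SPEC =====

-- Pre_ excludes exactly n < 0, where math.isqrt raises ValueError in both A and B.
def Pre_factor_via_collision_dim4 (n : Int) (max_reps : Int) : Prop := 0 ≤ n
instance (n : Int) (max_reps : Int) : Decidable (Pre_factor_via_collision_dim4 n max_reps) := by
  unfold Pre_factor_via_collision_dim4; infer_instance

def pvWitness_factor_via_collision_dim4 : Int × Int := (25, 20)

def Spec_factor_via_collision_dim4 (n : Int) (max_reps : Int) (out : Option Int) : Prop :=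
  out = factor_via_collision_dim4_alt n max_reps
instance (n : Int) (max_reps : Int) (out : Option Int) : Decidable (Spec_factor_via_collision_dim4 n max_reps out) := by
  unfold Spec_factor_via_collision_dim4; infer_instance

-- ===== CLAIM (what is proved, stated in full; the proofs are below) =====
def Claim_equal_factor_via_collision_dim4 : Prop := ∀ (n : Int) (max_reps : Int), Dom_factor_via_collision_dim4 n max_reps → Pre_factor_via_collision_dim4 n max_reps → Spec_factor_via_collision_dim4 n max_reps (factor_via_collision_dim4 n max_reps)

-- ===== LEMMAS AND PROOFS =====

def quadToList (t : Int × Int × Int × Int) : List Int := [t.1, t.2.1, t.2.2.1, t.2.2.2]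

theorem pyIsqrt_nonneg (m : Int) : 0 ≤ pyIsqrt m := Int.natCast_nonneg _

theorem sq_le_of_le_pyIsqrt {x m : Int} (hx : 0 ≤ x) (hm : 0 ≤ m) (h : x ≤ pyIsqrt m) :
    x * x ≤ m := by
  unfold pyIsqrt at h
  have h1 : x.toNat ≤ Nat.sqrt m.toNat := by omega
  have h2 : x.toNat * x.toNat ≤ m.toNat := Nat.le_sqrt.mp h1
  have h3 : (x.toNat : Int) * (x.toNat : Int) ≤ (m.toNat : Int) := by exact_mod_cast h2
  rw [Int.toNat_of_nonneg hx, Int.toNat_of_nonneg hm] at h3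
  exact h3

-- B's reps recursion in flatMap normal form
theorem bReps_succ (k : Nat) (m lo : Int) :
    bReps (k + 2) m lo =
      (PySem.List.pyRange lo (pyIsqrt m + 1) 1).flatMap
        (fun x => (bReps (k + 1) (m - x * x) x).map (x :: ·)) := by
  have h : ∀ (out : List (List Int)) (x : Int),
      (bReps (k + 1) (m - x * x) x).foldl (fun out2 rest => out2 ++ [x :: rest]) out
        = out ++ (bReps (k + 1) (m - x * x) x).map (x :: ·) := by
    intro out x
    exact PySem.List.foldl_append_singleton_eq_map _ _ _
  show (PySem.List.pyRange lo (pyIsqrt m + 1) 1).foldl _ [] = _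
  simp only [h]
  rw [PySem.List.foldl_append_eq_flatMap]
  simp

theorem aLoopC_eq (n a b : Int) (cs : List Int) (acc : List (Int × Int × Int × Int))
    (hc : ∀ c ∈ cs, 0 ≤ c) :
    aLoopC n a b cs acc = acc ++ cs.flatMap (fun c =>
      if pyIsqrt (n - a * a - b * b - c * c) * pyIsqrt (n - a * a - b * b - c * c)
           = n - a * a - b * b - c * c
         ∧ c ≤ pyIsqrt (n - a * a - b * b - c * c)
      then [(a, b, c, pyIsqrt (n - a * a - b * b - c * c))] else []) := by
  induction cs generalizing acc with
  | nil => simp [aLoopC]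
  | cons c cs ih =>
    have h0 : 0 ≤ c := hc c (by simp)
    have hcs : ∀ c' ∈ cs, 0 ≤ c' := fun c' h' => hc c' (by simp [h'])
    have hd0 : 0 ≤ pyIsqrt (n - a * a - b * b - c * c) := pyIsqrt_nonneg _
    by_cases h1 : n - a * a - b * b - c * c < c * c
    · have hfalse : ¬ (pyIsqrt (n - a*a - b*b - c*c) * pyIsqrt (n - a*a - b*b - c*c)
            = n - a*a - b*b - c*c ∧ c ≤ pyIsqrt (n - a*a - b*b - c*c)) := by
        rintro ⟨he, hle⟩
        nlinarith
      simp only [aLoopC, if_pos h1, ih acc hcs]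
      simp [hfalse]
    · by_cases h2 : pyIsqrt (n - a*a - b*b - c*c) * pyIsqrt (n - a*a - b*b - c*c)
          = n - a*a - b*b - c*c
      · have hle : c ≤ pyIsqrt (n - a*a - b*b - c*c) := by nlinarith
        simp only [aLoopC, if_neg h1, if_pos h2, ih _ hcs]
        simp [h2, hle]
      · simp only [aLoopC, if_neg h1, if_neg h2, ih acc hcs]
        simp [h2]

theorem aLoopB_eq (n a : Int) (bs : List Int) (acc : List (Int × Int × Int × Int))
    (hb : ∀ b ∈ bs, 0 ≤ b ∧ a * a + b * b ≤ n) :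
    aLoopB n a bs acc = acc ++ bs.flatMap (fun b =>
      (PySem.List.pyRange b (pyIsqrt (n - a * a - b * b) + 1) 1).flatMap (fun c =>
        if pyIsqrt (n - a * a - b * b - c * c) * pyIsqrt (n - a * a - b * b - c * c)
             = n - a * a - b * b - c * c
           ∧ c ≤ pyIsqrt (n - a * a - b * b - c * c)
        then [(a, b, c, pyIsqrt (n - a * a - b * b - c * c))] else [])) := by
  induction bs generalizing acc with
  | nil => simp [aLoopB]
  | cons b bs ih =>
    obtain ⟨hb0, hbn⟩ := hb b (by simp)
    have hbs : ∀ b' ∈ bs, 0 ≤ b' ∧ a * a + b' * b' ≤ n := fun b' h' => hb b' (by simp [h'])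
    have hbreak : ¬ (a * a + b * b > n) := by omega
    have hc : ∀ c ∈ PySem.List.pyRange b (pyIsqrt (n - a * a - b * b) + 1) 1, 0 ≤ c := by
      intro c hcmem
      rw [PySem.List.mem_pyRange_one] at hcmem
      omega
    simp only [aLoopB, if_neg hbreak, ih _ hbs, aLoopC_eq n a b _ acc hc]
    simp

theorem aLoopA_eq (n : Int) (as_ : List Int) (acc : List (Int × Int × Int × Int))
    (ha : ∀ a ∈ as_, 0 ≤ a ∧ a * a ≤ n) :
    aLoopA n as_ acc = acc ++ as_.flatMap (fun a =>
      (PySem.List.pyRange a (pyIsqrt (n - a * a) + 1) 1).flatMap (fun b =>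
        (PySem.List.pyRange b (pyIsqrt (n - a * a - b * b) + 1) 1).flatMap (fun c =>
          if pyIsqrt (n - a * a - b * b - c * c) * pyIsqrt (n - a * a - b * b - c * c)
               = n - a * a - b * b - c * c
             ∧ c ≤ pyIsqrt (n - a * a - b * b - c * c)
          then [(a, b, c, pyIsqrt (n - a * a - b * b - c * c))] else []))) := by
  induction as_ generalizing acc with
  | nil => simp [aLoopA]
  | cons a as_ ih =>
    obtain ⟨ha0, han⟩ := ha a (by simp)
    have has : ∀ a' ∈ as_, 0 ≤ a' ∧ a' * a' ≤ n := fun a' h' => ha a' (by simp [h'])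
    have hbreak : ¬ (a * a > n) := by omega
    have hb : ∀ b ∈ PySem.List.pyRange a (pyIsqrt (n - a * a) + 1) 1,
        0 ≤ b ∧ a * a + b * b ≤ n := by
      intro b hbmem
      rw [PySem.List.mem_pyRange_one] at hbmem
      have hb0 : 0 ≤ b := by omega
      have := sq_le_of_le_pyIsqrt hb0 (by omega) (by omega : b ≤ pyIsqrt (n - a * a))
      exact ⟨hb0, by omega⟩
    simp only [aLoopA, if_neg hbreak, ih _ has, aLoopB_eq n a _ acc hb]
    simp

theorem reps_eq (n : Int) (hn : 0 ≤ n) :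
    bReps 4 n 0 = (sum_of_4_squares n).map quadToList := by
  unfold sum_of_4_squares
  have ha : ∀ a ∈ PySem.List.pyRange 0 (pyIsqrt n + 1) 1, 0 ≤ a ∧ a * a ≤ n := by
    intro a hmem
    rw [PySem.List.mem_pyRange_one] at hmem
    exact ⟨hmem.1, sq_le_of_le_pyIsqrt hmem.1 hn (by omega)⟩
  rw [aLoopA_eq n _ [] ha]
  have e4 := bReps_succ 2 n 0
  norm_num at e4
  rw [e4]
  simp only [List.nil_append, List.map_flatMap]
  apply List.flatMap_congr
  intro a hamem
  have e3 := bReps_succ 1 (n - a * a) a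
  norm_num at e3
  rw [e3]
  simp only [List.map_flatMap, List.map_map]
  apply List.flatMap_congr
  intro b hbmem
  have e2 := bReps_succ 0 (n - a * a - b * b) b
  norm_num at e2
  rw [e2]
  simp only [List.map_flatMap, List.map_map]
  apply List.flatMap_congr
  intro c hcmem
  show (bReps 1 (n - a * a - b * b - c * c) c).map _ = _
  simp only [bReps]
  split_ifs with hP
  · simp [quadToList]
  · simp

-- per-block value of the collision inner test
def blk (nv c : Int) : Option Int :=
  if c = 0 then none
  else if 1 < pyGcd |c| nv ∧ pyGcd |c| nv < nv then some (pyGcd |c| nv) else none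

theorem blk_neg (nv c : Int) : blk nv (-c) = blk nv c := by
  simp [blk, abs_neg, neg_eq_zero]

theorem aScanJ_nil (n : Int) (r1 r2 : Int × Int × Int × Int) (i : Int) :
    aScanJ n r1 r2 i [] = none := rfl

theorem aScanJ_cons (n : Int) (r1 r2 : Int × Int × Int × Int) (i j : Int) (js : List Int) :
    aScanJ n r1 r2 i (j :: js) =
      if i = j then aScanJ n r1 r2 i js
      else (blk n (tget r1 i * tget r2 j - tget r1 j * tget r2 i)).or (aScanJ n r1 r2 i js) := by
  simp only [aScanJ, blk]
  split_ifs <;> simp [Option.or]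

theorem bScanJ_nil (n : Int) (r1 r2 : List Int) (i : Int) :
    bScanJ n r1 r2 i [] = none := rfl

theorem bScanJ_cons (n : Int) (r1 r2 : List Int) (i j : Int) (js : List Int) :
    bScanJ n r1 r2 i (j :: js) =
      (blk n (lget r1 i * lget r2 j - lget r1 j * lget r2 i)).or (bScanJ n r1 r2 i js) := by
  simp only [bScanJ, blk]
  split_ifs <;> simp [Option.or]

theorem aScanI_nil (n : Int) (r1 r2 : Int × Int × Int × Int) :
    aScanI n r1 r2 [] = none := rfl

theorem aScanI_cons (n : Int) (r1 r2 : Int × Int × Int × Int) (i : Int) (is_ : List Int) :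
    aScanI n r1 r2 (i :: is_) =
      (aScanJ n r1 r2 i (PySem.List.pyRange 0 4 1)).or (aScanI n r1 r2 is_) := by
  cases h : aScanJ n r1 r2 i (PySem.List.pyRange 0 4 1) <;> simp [aScanI, h, Option.or]

theorem bScanI_nil (n : Int) (r1 r2 : List Int) :
    bScanI n r1 r2 [] = none := rfl

theorem bScanI_cons (n : Int) (r1 r2 : List Int) (i : Int) (is_ : List Int) :
    bScanI n r1 r2 (i :: is_) =
      (bScanJ n r1 r2 i (PySem.List.pyRange (i + 1) 4 1)).or (bScanI n r1 r2 is_) := by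
  cases h : bScanJ n r1 r2 i (PySem.List.pyRange (i + 1) 4 1) <;> simp [bScanI, h, Option.or]

theorem pair_eq (n p q r s w x y z : Int) :
    aScanI n (p, q, r, s) (w, x, y, z) (PySem.List.pyRange 0 4 1)
      = bScanI n [p, q, r, s] [w, x, y, z] (PySem.List.pyRange 0 4 1) := by
  have h04 : PySem.List.pyRange 0 4 1 = [0, 1, 2, 3] := by decide
  have hB1 : PySem.List.pyRange ((0 : Int) + 1) 4 1 = [1, 2, 3] := by decide
  have hB2 : PySem.List.pyRange ((1 : Int) + 1) 4 1 = [2, 3] := by decide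
  have hB3 : PySem.List.pyRange ((2 : Int) + 1) 4 1 = [3] := by decide
  have hB4 : PySem.List.pyRange ((3 : Int) + 1) 4 1 = [] := by decide
  simp only [h04, aScanI_cons, bScanI_cons, aScanI_nil, bScanI_nil, hB1, hB2, hB3, hB4]
  norm_num [aScanJ_cons, bScanJ_cons, aScanJ_nil, bScanJ_nil, tget, lget,
    PySem.List.pyGetD_ofNat']
  have e1 : blk n (q * w - p * x) = blk n (p * x - q * w) := by
    rw [show q * w - p * x = -(p * x - q * w) by ring, blk_neg]
  have e2 : blk n (r * w - p * y) = blk n (p * y - r * w) := by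
    rw [show r * w - p * y = -(p * y - r * w) by ring, blk_neg]
  have e3 : blk n (s * w - p * z) = blk n (p * z - s * w) := by
    rw [show s * w - p * z = -(p * z - s * w) by ring, blk_neg]
  have e4 : blk n (r * x - q * y) = blk n (q * y - r * x) := by
    rw [show r * x - q * y = -(q * y - r * x) by ring, blk_neg]
  have e5 : blk n (s * x - q * z) = blk n (q * z - s * x) := by
    rw [show s * x - q * z = -(q * z - s * x) by ring, blk_neg]
  have e6 : blk n (s * y - r * z) = blk n (r * z - s * y) := by
    rw [show s * y - r * z = -(r * z - s * y) by ring, blk_neg]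
  rw [e1, e2, e3, e4, e5, e6]
  generalize blk n (p * x - q * w) = o1
  generalize blk n (p * y - r * w) = o2
  generalize blk n (p * z - s * w) = o3
  generalize blk n (q * y - r * x) = o4
  generalize blk n (q * z - s * x) = o5
  generalize blk n (r * z - s * y) = o6
  cases o1 <;> cases o2 <;> cases o3 <;> cases o4 <;> cases o5 <;> cases o6 <;> rfl

theorem aScanPairs_append (n : Int) (l1 l2 : List (List (Int × Int × Int × Int))) :
    aScanPairs n (l1 ++ l2) = (aScanPairs n l1).or (aScanPairs n l2) := by
  induction l1 with
  | nil => simp [aScanPairs, Option.or]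
  | cons h t ih =>
    rcases h with _ | ⟨r1, _ | ⟨r2, _ | ⟨r3, rest⟩⟩⟩
    · simpa [aScanPairs] using ih
    · simpa [aScanPairs] using ih
    · simp only [List.cons_append, aScanPairs]
      cases hs : aScanI n r1 r2 (PySem.List.pyRange 0 4 1) <;> simp [Option.or, ih]
    · simpa [aScanPairs] using ih

theorem pair_eq' (n : Int) (x y : Int × Int × Int × Int) :
    aScanI n x y (PySem.List.pyRange 0 4 1)
      = bScanI n (quadToList x) (quadToList y) (PySem.List.pyRange 0 4 1) := by
  obtain ⟨p, q, r, s⟩ := x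
  obtain ⟨w, a, b, c⟩ := y
  exact pair_eq n p q r s w a b c

theorem pairsRow (n : Int) (x : Int × Int × Int × Int) (t : List (Int × Int × Int × Int)) :
    aScanPairs n (t.map (fun y => [x, y])) = bScanR2 n (quadToList x) (t.map quadToList) := by
  induction t with
  | nil => rfl
  | cons y t ih =>
    simp only [List.map_cons, aScanPairs, bScanR2]
    rw [pair_eq' n x y]
    cases hs : bScanI n (quadToList x) (quadToList y) (PySem.List.pyRange 0 4 1) <;>
      simp [ih]

theorem scan_eq (n : Int) (l : List (Int × Int × Int × Int)) :
    aScanPairs n (PySem.List.combinations l 2)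
      = bScanR1 n (l.map quadToList) (l.map quadToList) := by
  induction l with
  | nil => rfl
  | cons x t ih =>
    rw [show (2 : Nat) = 1 + 1 from rfl, PySem.List.combinations_cons_succ,
      PySem.List.combinations_one, aScanPairs_append]
    simp only [List.map_map, List.map_cons, bScanR1]
    rw [PySem.List.slice_from_one]
    simp only [List.tail_cons]
    have hrow := pairsRow n x t
    simp only [Function.comp_def] at hrow ⊢
    rw [hrow]
    cases hs : bScanR2 n (quadToList x) (t.map quadToList) <;> simp [Option.or, ih]

theorem slice_map (f : (Int × Int × Int × Int) → List Int)
    (l : List (Int × Int × Int × Int)) (b : Int) :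
    PySem.List.slice (l.map f) none (some b) = (PySem.List.slice l none (some b)).map f := by
  unfold PySem.List.slice
  simp [List.map_take]

-- ===== VERDICT (by name: the statement is the Claim_ definition above) =====
theorem factor_via_collision_dim4_spec : Claim_equal_factor_via_collision_dim4 := by
  unfold Claim_equal_factor_via_collision_dim4
  intro n mr _ hpre
  unfold Spec_factor_via_collision_dim4 factor_via_collision_dim4 factor_via_collision_dim4_alt
  rw [reps_eq n hpre, slice_map]
  show (if (PySem.List.slice (sum_of_4_squares n) none (some mr)).length < 2 then none
        else aScanPairs n
          (PySem.List.combinations (PySem.List.slice (sum_of_4_squares n) none (some mr)) 2))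
      = (if ((PySem.List.slice (sum_of_4_squares n) none (some mr)).map quadToList).length < 2
         then none
         else bScanR1 n ((PySem.List.slice (sum_of_4_squares n) none (some mr)).map quadToList)
           ((PySem.List.slice (sum_of_4_squares n) none (some mr)).map quadToList))
  rw [List.length_map]
  by_cases h2 : (PySem.List.slice (sum_of_4_squares n) none (some mr)).length < 2
  · simp [h2]
  · simp only [h2, if_false]
    exact scan_eq n _
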